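-- pv_equiv track=rewrite | github.com/yaweli/microFlyton | server/apis/tools/kiclang.py | txtGetProp
-- ===== SOURCE A (Python) =====
-- def txtGetProp(z):
--     before=""
--     after=""
--     mode=0
--     s=""
--     for char in z:
--         if mode==0 and char==" ":
--             before+=" "
--             continue
--         if char!=" ":
--             mode=1
--         if mode==1:
--             s += char
--     if mode==1:
--         for char in reversed(z):
--             if mode==1 and char==" ":
--                 after += " "
--                 s = s[:-1]
--                 continue
--             if char!=" ":
--                 break
--     return before,after,s
-- ===== SOURCE B (Python) =====
-- def txtGetProp(z):
--     core = z.lstrip(" ")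
--     before = z[:len(z) - len(core)]
--     s = core.rstrip(" ")
--     after = core[len(s):]
--     return before, after, s
-- ===== Notes on version B (the rewrite author's own statement) =====
-- stated objective: simpler
-- what changed: Replaced the mode-flag character loop and the reversed-scan loop (which rebuilds s and trims it char by char) with four boundary computations: lstrip/rstrip plus two slices.
import Mathlib
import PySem

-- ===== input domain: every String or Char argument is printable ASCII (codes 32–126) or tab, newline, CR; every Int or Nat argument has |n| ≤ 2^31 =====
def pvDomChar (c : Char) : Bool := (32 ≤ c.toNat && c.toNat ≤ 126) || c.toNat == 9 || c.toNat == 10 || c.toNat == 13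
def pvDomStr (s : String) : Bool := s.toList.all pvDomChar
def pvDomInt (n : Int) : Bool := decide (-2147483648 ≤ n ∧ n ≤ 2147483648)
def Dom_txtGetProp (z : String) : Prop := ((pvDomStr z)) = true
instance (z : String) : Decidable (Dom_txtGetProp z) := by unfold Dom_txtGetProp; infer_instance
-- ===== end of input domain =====

-- B replaces A's mode-flag forward scan and reversed trimming loop by four boundary
-- computations (lstrip/rstrip and two slices); objective: simpler.


-- ===== PORT A =====
-- first loop of A: state (before, mode, s); branches in source order
def txtALoop1 : List Char → List Char × Nat × List Char → List Char × Nat × List Char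
  | [], st => st
  | c :: rest, (before, mode, s) =>
    if mode == 0 && c == ' ' then
      txtALoop1 rest (before ++ [' '], mode, s)
    else
      let mode := if c != ' ' then 1 else mode
      let s := if mode == 1 then s ++ [c] else s
      txtALoop1 rest (before, mode, s)

-- second loop of A: over reversed(z); mode is 1 throughout (it is only entered when mode==1
-- and never written inside), so 'mode==1 and char==" "' is 'char==" "'; break on non-space
def txtALoop2 : List Char → List Char × List Char → List Char × List Char
  | [], st => st
  | c :: rest, (after, s) =>
    if c == ' ' then
      txtALoop2 rest (after ++ [' '], PySem.List.slice s none (some (-1)))  -- s = s[:-1]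
    else (after, s)

def txtGetProp (z : String) : String × String × String :=
  let r1 := txtALoop1 z.toList ([], 0, [])
  let before := r1.1; let mode := r1.2.1; let s := r1.2.2
  let r2 := if mode == 1 then txtALoop2 z.toList.reverse ([], s) else ([], s)
  (String.ofList before, String.ofList r2.1, String.ofList r2.2)

-- ===== PORT B =====
-- z.lstrip(" ") is dropWhile (== ' '); core.rstrip(" ") is reverse∘dropWhile∘reverse
-- (exact: both only remove the character ' '); z[:k] is take, core[k:] is drop
def txtGetProp_alt (z : String) : String × String × String :=
  let cs := z.toList
  let core := cs.dropWhile (· == ' ')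
  let before := cs.take (cs.length - core.length)
  let s := (core.reverse.dropWhile (· == ' ')).reverse
  let after := core.drop s.length
  (String.ofList before, String.ofList after, String.ofList s)

-- ===== PRECONDITION & SPEC =====
def Spec_txtGetProp (z : String) (out : String × String × String) : Prop := out = txtGetProp_alt z
instance (z : String) (out : String × String × String) : Decidable (Spec_txtGetProp z out) := by unfold Spec_txtGetProp; infer_instance

-- ===== CLAIM (what is proved, stated in full; the proofs are below) =====
def Claim_equal_txtGetProp : Prop := ∀ (z : String), Dom_txtGetProp z → Spec_txtGetProp z (txtGetProp z)

-- ===== LEMMAS AND PROOFS =====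

-- the head of a nonempty dropWhile fails the predicate
theorem dropWhile_cons_head_false {l l2 : List Char} {p : Char → Bool} {c : Char}
    (h : l.dropWhile p = c :: l2) : p c = false := by
  induction l with
  | nil => simp at h
  | cons a as ih =>
    rw [List.dropWhile_cons] at h
    split at h
    · exact ih h
    · rename_i hp; cases h; simpa using hp

-- once mode is 1, A's first loop appends every remaining char to s
theorem txtALoop1_mode1 (cs : List Char) (b s : List Char) :
    txtALoop1 cs (b, 1, s) = (b, 1, s ++ cs) := by
  induction cs generalizing s with
  | nil => simp [txtALoop1]
  | cons c rest ih =>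
    simp only [txtALoop1]
    have h1 : ((1 : Nat) == 0 && c == ' ') = false := by simp
    rw [h1]
    simp only [Bool.false_eq_true, if_false]
    have h2 : (if c != ' ' then 1 else 1) = 1 := by split <;> rfl
    simp only [h2, beq_self_eq_true, if_true, ih]
    simp

-- A's first loop from the initial state: before collects the leading spaces, and
-- (mode, s) record whether/what remains after them
theorem txtALoop1_spec (cs : List Char) (b : List Char) :
    txtALoop1 cs (b, 0, []) =
      (b ++ cs.takeWhile (· == ' '),
       if cs.dropWhile (· == ' ') = [] then 0 else 1,
       cs.dropWhile (· == ' ')) := by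
  induction cs generalizing b with
  | nil => simp [txtALoop1]
  | cons c rest ih =>
    by_cases hc : c = ' '
    · subst hc
      simp only [txtALoop1]
      norm_num
      rw [ih]
      simp [List.append_assoc]
    · have hb : (c == ' ') = false := by simp [hc]
      simp only [txtALoop1, hb, Bool.and_false, Bool.false_eq_true, if_false]
      have h2 : (c != ' ') = true := by simp [hc]
      simp only [h2, if_true, beq_self_eq_true, List.nil_append]
      rw [txtALoop1_mode1]
      simp [hb]

-- A's second loop consumes the leading spaces of its input, growing after and
-- trimming the same number of chars off the end of s
theorem txtALoop2_spec (ds : List Char) (a s : List Char)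
    (h : (ds.takeWhile (· == ' ')).length ≤ s.length) :
    txtALoop2 ds (a, s) =
      (a ++ ds.takeWhile (· == ' '),
       s.take (s.length - (ds.takeWhile (· == ' ')).length)) := by
  induction ds generalizing a s with
  | nil => simp [txtALoop2]
  | cons c rest ih =>
    by_cases hc : c = ' '
    · subst hc
      have hsl : PySem.List.slice s none (some (-1)) = s.dropLast := by simp [pysem]
      simp only [List.takeWhile_cons, beq_self_eq_true, if_true, List.length_cons] at h ⊢
      simp only [txtALoop2, beq_self_eq_true, if_true, hsl]
      have hle : (rest.takeWhile (· == ' ')).length ≤ s.dropLast.length := by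
        rw [List.length_dropLast]; omega
      rw [ih _ _ hle]
      congr 1
      · simp [List.append_assoc]
      · rw [List.dropLast_eq_take, List.take_take]
        simp only [List.length_take]
        congr 1
        omega
    · have hb : (c == ' ') = false := by simp [hc]
      simp [txtALoop2, hb]

theorem txtGetProp_spec : Claim_equal_txtGetProp := by
  intro z _
  unfold Spec_txtGetProp txtGetProp txtGetProp_alt
  dsimp only
  rw [txtALoop1_spec]
  generalize z.toList = cs
  set t := cs.takeWhile (· == ' ') with ht
  set core := cs.dropWhile (· == ' ') with hcore
  have hsplit : t ++ core = cs := List.takeWhile_append_dropWhile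
  have hbefore : cs.take (cs.length - core.length) = t := by
    have hlen : cs.length - core.length = t.length := by
      have := congrArg List.length hsplit
      simp at this; omega
    rw [hlen, ← hsplit, List.take_left]
  by_cases hcemp : core = []
  · -- all-spaces (or empty) string: mode stays 0
    rw [if_pos hcemp]
    have h0 : ((0 : Nat) == 1) = false := by decide
    rw [h0]
    have htc : t = cs := by rw [← hsplit, hcemp, List.append_nil]
    simp [hcemp, htc]
  · -- core nonempty: mode = 1, second loop runs
    rw [if_neg hcemp]
    have h1 : ((1 : Nat) == 1) = true := by decide
    rw [h1]
    simp only [if_true]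
    -- head of core is not a space
    obtain ⟨c, u, hcu⟩ := List.exists_cons_of_ne_nil hcemp
    have hchd : (c == ' ') = false := by
      have h : cs.dropWhile (· == ' ') = c :: u := by rw [← hcore]; exact hcu
      exact dropWhile_cons_head_false (p := fun y => y == ' ') h
    -- trailing spaces of cs = trailing spaces of core
    set w := core.reverse.takeWhile (· == ' ') with hw
    set d := core.reverse.dropWhile (· == ' ') with hd
    have hwd : w ++ d = core.reverse := List.takeWhile_append_dropWhile
    have hrev : cs.reverse.takeWhile (· == ' ') = w := by
      rw [← hsplit, List.reverse_append, List.takeWhile_append]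
      have hne : (core.reverse.takeWhile (· == ' ')).length ≠ core.reverse.length := by
        intro hlen
        have hall : core.reverse.takeWhile (· == ' ') = core.reverse :=
          (List.takeWhile_sublist _).eq_of_length hlen
        have hmem : ∀ x ∈ core.reverse, (x == ' ') = true := by
          intro x hx; rw [← hall] at hx
          exact List.mem_takeWhile_imp (p := fun y => y == ' ') (l := core.reverse) hx
        have := hmem c (by simp [hcu])
        rw [hchd] at this; exact absurd this (by decide)
      rw [if_neg hne]
    have hcore_eq : core = d.reverse ++ w.reverse := by
      have h := congrArg List.reverse hwd
      simp [List.reverse_append] at h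
      exact h.symm
    have hwspaces : w.reverse = w := by
      have hmem : ∀ x ∈ w, x = ' ' := by
        intro x hx
        have := List.mem_takeWhile_imp (p := fun y => y == ' ') (l := core.reverse) hx
        simpa using this
      rw [List.eq_replicate_of_mem hmem, List.reverse_replicate,
          ← List.eq_replicate_of_mem hmem]
    have hklen : w.length ≤ core.length := by
      have := congrArg List.length hwd
      simp at this; omega
    rw [txtALoop2_spec _ _ _ (by rw [hrev]; simpa using hklen)]
    rw [hrev]
    have hdl : core.length - w.length = d.reverse.length := by
      have := congrArg List.length hwd
      simp at this ⊢; omega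
    have hs : core.take (core.length - w.length) = d.reverse := by
      rw [hdl]
      conv_lhs => rw [hcore_eq]
      exact List.take_left
    have hafter : core.drop d.reverse.length = w := by
      conv_lhs => rw [hcore_eq]
      rw [List.drop_left, hwspaces]
    have hafter' : core.drop d.length = w := by simpa using hafter
    have hs' : core.take d.length = d.reverse := by
      have h := hs; rw [hdl] at h; simpa using h
    simp [hbefore, hs, hafter']
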